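-- pv_equiv track=rewrite | github.com/groscot/pygraving | guitarhelper/chords.py | string_positions_to_degrees
-- ===== SOURCE A (Python) =====
-- degree_to_semitone = {
--     1: 0, 2: 2, 3: 4, 4: 5, 5: 7, 6: 9, 7: 11
-- }
--
-- base_string_semitones = [-8, -3, 2, 7, 11, 16]
--
-- def string_positions_to_degrees(positions: list[int]):
--     assert len(positions) == 6
--     notes = []
--     for i in range(6):
--         if positions[i] is not None:
--             base_semitone = base_string_semitones[i]
--             total_semitones = base_semitone + positions[i]
--
--             # Calculate octave and degree
--             octave = total_semitones // 12
--             semitone_in_octave = total_semitones % 12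
--
--             # Find the corresponding degree using cumulative sum strategy
--             degree = 1
--             cumulative_semitones = 0
--             while cumulative_semitones < semitone_in_octave:
--                 cumulative_semitones += degree_to_semitone[degree + 1] - degree_to_semitone[degree]
--                 degree += 1
--
--             if cumulative_semitones > semitone_in_octave:
--                 degree -= 1
--                 modifier = "#"
--             elif cumulative_semitones < semitone_in_octave:
--                 modifier = "b"
--             else:
--                 modifier = ""
--             # degree = next((d for d, s in degree_to_semitone.items() if s == semitone_in_octave), 0)
--             # if degree == 0:
--             #     degree = 7
--
--             # Handle sharps and flats
--             modifier = ""
--             if semitone_in_octave in [1, 3, 6, 8, 10]: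
--                 if semitone_in_octave in [1, 6]:
--                     modifier = "#"
--                 else:
--                     modifier = "b"
--
--             degree += 7*octave
--
--             notes.append(modifier + str(degree))
--     return notes
-- ===== SOURCE B (Python) =====
-- base_string_semitones = [-8, -3, 2, 7, 11, 16]
--
-- # semitone-in-octave (0..11) -> (degree, modifier); encodes A's cumulative-sum
-- # search plus overshoot adjustment and the sharp/flat membership tests.
-- SEMITONE_TABLE = {
--     0: (1, ""), 1: (1, "#"), 2: (2, ""), 3: (2, "b"), 4: (3, ""),
--     5: (4, ""), 6: (4, "#"), 7: (5, ""), 8: (5, "b"), 9: (6, ""),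
--     10: (6, "b"), 11: (7, ""),
-- }
--
-- def _label(total_semitones):
--     degree, modifier = SEMITONE_TABLE[total_semitones % 12]
--     return modifier + str(degree + 7 * (total_semitones // 12))
--
-- def string_positions_to_degrees(positions: list[int]):
--     assert len(positions) == 6
--     return [_label(base + p)
--             for base, p in zip(base_string_semitones, positions)
--             if p is not None]
-- ===== Notes on version B (the rewrite author's own statement) =====
-- stated objective: simpler
-- what changed: Replaces the per-note while-loop cumulative-sum search and the two modifier computations with a single precomputed 12-entry table lookup, and the index-driven accumulator loop with a zip/list-comprehension.
import Mathlib
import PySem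

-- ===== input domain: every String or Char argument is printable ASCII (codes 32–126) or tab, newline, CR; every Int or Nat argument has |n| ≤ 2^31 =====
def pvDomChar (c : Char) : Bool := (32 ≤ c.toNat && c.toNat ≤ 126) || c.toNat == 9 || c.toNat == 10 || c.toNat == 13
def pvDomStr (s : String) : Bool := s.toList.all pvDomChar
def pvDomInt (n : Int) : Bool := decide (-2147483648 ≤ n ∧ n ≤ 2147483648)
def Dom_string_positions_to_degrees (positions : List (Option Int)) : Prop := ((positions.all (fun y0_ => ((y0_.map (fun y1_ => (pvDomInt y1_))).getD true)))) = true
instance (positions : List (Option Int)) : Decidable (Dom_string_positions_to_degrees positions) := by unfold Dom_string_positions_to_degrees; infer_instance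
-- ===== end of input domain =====

-- B replaces A's per-note while-loop search and modifier tests with one 12-entry table lookup (simpler, same cost).

-- ===== PORT A =====
def degreeToSemitone : PySem.Dict Int Int := PySem.Dict.ofList [(1,0),(2,2),(3,4),(4,5),(5,7),(6,9),(7,11)]

def baseStringSemitones : List Int := [-8, -3, 2, 7, 11, 16]

-- the while loop; fuel 12 suffices since semitone_in_octave ∈ [0,12); getD 0 is exact
-- because keys degree, degree+1 ∈ 1..7 are always present on the iterations reached
def aWhile : Nat → Int → Int → Int → Int × Int
  | 0, degree, cum, _ => (degree, cum)
  | n+1, degree, cum, s =>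
    if cum < s then
      aWhile n (degree + 1) (cum + (degreeToSemitone.getD (degree + 1) 0 - degreeToSemitone.getD degree 0)) s
    else (degree, cum)

-- body of the `if positions[i] is not None` branch
def aNote (base_semitone p : Int) : String :=
  let total_semitones := base_semitone + p
  let octave := PySem.Int.floordiv total_semitones 12
  let semitone_in_octave := PySem.Int.mod total_semitones 12
  let dc := aWhile 12 1 0 semitone_in_octave
  let degree0 := if dc.2 > semitone_in_octave then dc.1 - 1 else dc.1
  -- the first `modifier` assignment is dead (A reassigns it unconditionally)
  let modifier :=
    if semitone_in_octave = 1 ∨ semitone_in_octave = 3 ∨ semitone_in_octave = 6 ∨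
       semitone_in_octave = 8 ∨ semitone_in_octave = 10 then
      (if semitone_in_octave = 1 ∨ semitone_in_octave = 6 then "#" else "b")
    else ""
  modifier ++ PySem.Int.toStr (degree0 + 7 * octave)

def string_positions_to_degrees (positions : List (Option Int)) : List String :=
  (PySem.List.pyRange 0 6 1).foldl (fun notes i =>
    match PySem.List.pyGet? positions i with
    | some (some p) =>
      match PySem.List.pyGet? baseStringSemitones i with
      | some base => notes ++ [aNote base p]
      | none => notes      -- IndexError; unreachable (list literal of length 6)
    | some none => notes   -- positions[i] is None
    | none => notes        -- IndexError; outside Pre_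
    ) []

-- ===== PORT B =====
def baseStringSemitonesB : List Int := [-8, -3, 2, 7, 11, 16]

def semitoneTable : PySem.Dict Int (Int × String) := PySem.Dict.ofList
  [(0,(1,"")),(1,(1,"#")),(2,(2,"")),(3,(2,"b")),(4,(3,"")),(5,(4,"")),
   (6,(4,"#")),(7,(5,"")),(8,(5,"b")),(9,(6,"")),(10,(6,"b")),(11,(7,""))]

def bLabel (total_semitones : Int) : String :=
  let dm := semitoneTable.getD (PySem.Int.mod total_semitones 12) (0, "")
  dm.2 ++ PySem.Int.toStr (dm.1 + 7 * PySem.Int.floordiv total_semitones 12)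

def string_positions_to_degrees_alt (positions : List (Option Int)) : List String :=
  (baseStringSemitonesB.zip positions).filterMap (fun bp =>
    bp.2.map (fun p => bLabel (bp.1 + p)))

-- ===== PRECONDITION & SPEC =====
-- A asserts len(positions) == 6 and raises AssertionError otherwise; B asserts too.
def Pre_string_positions_to_degrees (positions : List (Option Int)) : Prop := positions.length = 6
instance (positions : List (Option Int)) : Decidable (Pre_string_positions_to_degrees positions) := by unfold Pre_string_positions_to_degrees; infer_instance

def pvWitness_string_positions_to_degrees : List (Option Int) := [some 0, some 2, none, some 3, none, some (-5)]

def Spec_string_positions_to_degrees (positions : List (Option Int)) (out : List String) : Prop := out = string_positions_to_degrees_alt positions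
instance (positions : List (Option Int)) (out : List String) : Decidable (Spec_string_positions_to_degrees positions out) := by unfold Spec_string_positions_to_degrees; infer_instance

-- ===== CLAIM (what is proved, stated in full; the proofs are below) =====
def Claim_equal_string_positions_to_degrees : Prop := ∀ (positions : List (Option Int)), Dom_string_positions_to_degrees positions → Pre_string_positions_to_degrees positions → Spec_string_positions_to_degrees positions (string_positions_to_degrees positions)

-- ===== LEMMAS AND PROOFS =====

-- per-note equality: A's while-loop + adjustment + membership modifier = B's table lookup
theorem aNote_eq_bLabel (base p : Int) : aNote base p = bLabel (base + p) := by
  have h0 : 0 ≤ PySem.Int.mod (base + p) 12 := PySem.Int.mod_nonneg _ (by norm_num)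
  have h1 : PySem.Int.mod (base + p) 12 < 12 := PySem.Int.mod_lt _ (by norm_num)
  simp only [aNote, bLabel]
  generalize hO : PySem.Int.floordiv (base + p) 12 = oct
  generalize hM : PySem.Int.mod (base + p) 12 = s at h0 h1 ⊢
  interval_cases s <;>
    norm_num [show aWhile 12 1 0 0 = (1, 0) from by decide,
      show aWhile 12 1 0 1 = (2, 2) from by decide,
      show aWhile 12 1 0 2 = (2, 2) from by decide,
      show aWhile 12 1 0 3 = (3, 4) from by decide,
      show aWhile 12 1 0 4 = (3, 4) from by decide,
      show aWhile 12 1 0 5 = (4, 5) from by decide,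
      show aWhile 12 1 0 6 = (5, 7) from by decide,
      show aWhile 12 1 0 7 = (5, 7) from by decide,
      show aWhile 12 1 0 8 = (6, 9) from by decide,
      show aWhile 12 1 0 9 = (6, 9) from by decide,
      show aWhile 12 1 0 10 = (7, 11) from by decide,
      show aWhile 12 1 0 11 = (7, 11) from by decide,
      show semitoneTable.getD 0 (0, "") = (1, "") from by decide,
      show semitoneTable.getD 1 (0, "") = (1, "#") from by decide,
      show semitoneTable.getD 2 (0, "") = (2, "") from by decide,
      show semitoneTable.getD 3 (0, "") = (2, "b") from by decide,
      show semitoneTable.getD 4 (0, "") = (3, "") from by decide,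
      show semitoneTable.getD 5 (0, "") = (4, "") from by decide,
      show semitoneTable.getD 6 (0, "") = (4, "#") from by decide,
      show semitoneTable.getD 7 (0, "") = (5, "") from by decide,
      show semitoneTable.getD 8 (0, "") = (5, "b") from by decide,
      show semitoneTable.getD 9 (0, "") = (6, "") from by decide,
      show semitoneTable.getD 10 (0, "") = (6, "b") from by decide,
      show semitoneTable.getD 11 (0, "") = (7, "") from by decide]

-- ===== VERDICT (by name: the statement is the Claim_ definition above) =====
set_option maxHeartbeats 2000000 in
theorem string_positions_to_degrees_spec : Claim_equal_string_positions_to_degrees := by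
  intro positions _ hpre
  unfold Spec_string_positions_to_degrees
  unfold Pre_string_positions_to_degrees at hpre
  obtain ⟨o0, o1, o2, o3, o4, o5, rfl⟩ :
      ∃ a b c d e f, positions = [a, b, c, d, e, f] := by
    rcases positions with _ | ⟨a, _ | ⟨b, _ | ⟨c, _ | ⟨d, _ | ⟨e, _ | ⟨f, _ | ⟨g, t⟩⟩⟩⟩⟩⟩⟩ <;>
      simp_all
  have hr : PySem.List.pyRange 0 6 1 = [0, 1, 2, 3, 4, 5] := by decide
  rcases o0 with _ | p0 <;> rcases o1 with _ | p1 <;> rcases o2 with _ | p2 <;>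
    rcases o3 with _ | p3 <;> rcases o4 with _ | p4 <;> rcases o5 with _ | p5 <;>
    simp [string_positions_to_degrees, string_positions_to_degrees_alt, hr,
      PySem.List.pyGet?, PySem.List.pyIdx?, baseStringSemitones, baseStringSemitonesB,
      List.zip, aNote_eq_bLabel]
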